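-- pv_equiv track=rewrite | github.com/leonaestrada8/Code_Challenge | 05_counter.py | solution
-- ===== SOURCE A (Python) =====
-- def solution(a, b, queries):
--
--     # Create a dictionary 'pair_counts' to store the frequency count of each sum of pairs
--     # between the elements of 'a' and 'b'.
--     pair_counts = {}
--     for i in range(len(a)):
--         for j in range(len(b)):
--             pair_sum = a[i] + b[j]
--             # Add the sum of each pair to 'pair_counts', initializing its frequency count to 0
--             if pair_sum not in pair_counts:
--                 pair_counts[pair_sum] = 0
--             pair_counts[pair_sum] += 1
--
--     # Initialize variables to keep track of the counts of pair sums before and after updates to a.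
--     before_count = sum(pair_counts.get(x[1], 0) for x in queries if x[0] == 1)
--     after_count = before_count
--     results = []
--
--     # For each query in 'queries', perform the appropriate operation and update the counts of pair sums.
--     for query in queries:
--         # If the query is of the form [0, i, x], update a[i] to be x, and update 'pair_counts' with the new pairs
--         if query[0] == 0:
--             i, x = query[1:]
--             old_a = a[i]
--             a[i] = x
--             for j in range(len(b)):
--                 old_pair_sum = old_a + b[j]
--                 if old_pair_sum in pair_counts:
--                     pair_counts[old_pair_sum] -= 1
--                 new_pair_sum = x + b[j]
--                 if new_pair_sum not in pair_counts:
--                     pair_counts[new_pair_sum] = 0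
--                 pair_counts[new_pair_sum] += 1
--             after_count = sum(pair_counts.get(x[1], 0) for x in queries if x[0] == 1)
--         # If the query is of the form [1, x], find the frequency count of the sum x in 'pair_counts' and add it to 'results'
--         elif query[0] == 1:
--             x = query[1]
--             results.append(pair_counts.get(x, 0))
--
--     # Return the counts of pair sums before and after updates to a.
--     return results
-- ===== SOURCE B (Python) =====
-- def solution(a, b, queries):
--     # Maintain a frequency counter of the values of `a` only (no pair-sum table);
--     # a type-1 query [1, x] is answered as sum over b of count_a[x - bj].
--     # Mutates `a` in place on type-0 queries, like the original.
--     count_a = {}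
--     for v in a:
--         count_a[v] = count_a.get(v, 0) + 1
--     results = []
--     for query in queries:
--         if query[0] == 0:
--             i, x = query[1:]
--             old = a[i]
--             count_a[old] = count_a.get(old, 0) - 1
--             a[i] = x
--             count_a[x] = count_a.get(x, 0) + 1
--         elif query[0] == 1:
--             x = query[1]
--             results.append(sum(count_a.get(x - bj, 0) for bj in b))
--     return results
-- ===== Notes on version B (the rewrite author's own statement) =====
-- stated objective: faster
-- what changed: Replaces the precomputed pair-sum frequency dictionary (built by a nested loop over a and b, updated over all of b on every type-0 query, with a dead sum over all queries recomputed after each update) by a plain value counter of `a`, answering each type-1 query [1,x] as sum over b of count_a[x-bj]; the in-place mutation of `a` is kept.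
import Mathlib
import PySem

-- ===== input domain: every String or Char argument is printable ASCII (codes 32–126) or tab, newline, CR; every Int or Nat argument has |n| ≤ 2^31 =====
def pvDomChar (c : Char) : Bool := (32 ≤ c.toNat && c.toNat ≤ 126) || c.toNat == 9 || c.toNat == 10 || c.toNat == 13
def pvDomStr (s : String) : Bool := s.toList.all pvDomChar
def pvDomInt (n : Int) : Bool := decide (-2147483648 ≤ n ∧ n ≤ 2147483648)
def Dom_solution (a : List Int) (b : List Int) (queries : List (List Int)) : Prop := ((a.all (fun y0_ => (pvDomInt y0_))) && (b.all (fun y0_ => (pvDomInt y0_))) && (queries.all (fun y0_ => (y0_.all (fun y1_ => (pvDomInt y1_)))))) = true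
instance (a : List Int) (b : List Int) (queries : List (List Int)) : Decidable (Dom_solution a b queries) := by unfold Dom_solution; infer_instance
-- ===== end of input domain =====

-- B replaces A's pair-sum frequency dictionary (nested build loop, O(|b|) rework per update plus a
-- dead recomputed sum over all queries) by a value counter of `a`, answering each sum query by one
-- pass over `b`. In Python both mutate `a` in place identically; the equivalence is about the return value.

-- ===== PORT A =====
-- sum(pair_counts.get(x[1], 0) for x in queries if x[0] == 1)
def pvSumType1 (pc : PySem.Dict Int Int) (queries : List (List Int)) : Int :=
  ((queries.filter (fun x => PySem.List.pyGetD x 0 0 == 1)).map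
      (fun x => pc.getD (PySem.List.pyGetD x 1 0) 0)).sum

-- the nested build loop over range(len(a)) x range(len(b))
def pvBuildPairs (a : List Int) (b : List Int) : PySem.Dict Int Int :=
  (PySem.List.pyRange 0 a.length 1).foldl (fun pc i =>
    (PySem.List.pyRange 0 b.length 1).foldl (fun pc j =>
      let s := PySem.List.pyGetD a i 0 + PySem.List.pyGetD b j 0
      let pc := if pc.contains s then pc else pc.insert s 0
      pc.modify s 0 (· + 1)) pc) PySem.Dict.empty

-- one iteration of A's query loop (state: a, pair_counts, after_count, results)
def pvStepA (b : List Int) (queries : List (List Int))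
    (st : List Int × PySem.Dict Int Int × Int × List Int) (q : List Int) :
    List Int × PySem.Dict Int Int × Int × List Int :=
  let (a, pc, afterCount, res) := st
  if PySem.List.pyGetD q 0 0 == 0 then
    let i := PySem.List.pyGetD q 1 0
    let x := PySem.List.pyGetD q 2 0
    let oldA := PySem.List.pyGetD a i 0
    let a := PySem.List.pySetD a i x
    let pc := (PySem.List.pyRange 0 b.length 1).foldl (fun pc j =>
        let oldS := oldA + PySem.List.pyGetD b j 0
        let pc := if pc.contains oldS then pc.modify oldS 0 (· - 1) else pc
        let newS := x + PySem.List.pyGetD b j 0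
        let pc := if pc.contains newS then pc else pc.insert newS 0
        pc.modify newS 0 (· + 1)) pc
    (a, pc, pvSumType1 pc queries, res)
  else if PySem.List.pyGetD q 0 0 == 1 then
    let x := PySem.List.pyGetD q 1 0
    (a, pc, afterCount, res ++ [pc.getD x 0])
  else (a, pc, afterCount, res)

def solution (a : List Int) (b : List Int) (queries : List (List Int)) : List Int :=
  let pc := pvBuildPairs a b
  let beforeCount := pvSumType1 pc queries
  let afterCount := beforeCount
  (queries.foldl (pvStepA b queries) (a, pc, afterCount, [])).2.2.2

-- ===== PORT B =====
def pvCountA (a : List Int) : PySem.Dict Int Int :=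
  a.foldl (fun d v => d.insert v (d.getD v 0 + 1)) PySem.Dict.empty

-- one iteration of B's query loop (state: a, count_a, results)
def pvStepB (b : List Int)
    (st : List Int × PySem.Dict Int Int × List Int) (q : List Int) :
    List Int × PySem.Dict Int Int × List Int :=
  let (a, ca, res) := st
  if PySem.List.pyGetD q 0 0 == 0 then
    let i := PySem.List.pyGetD q 1 0
    let x := PySem.List.pyGetD q 2 0
    let old := PySem.List.pyGetD a i 0
    let ca := ca.insert old (ca.getD old 0 - 1)
    let a := PySem.List.pySetD a i x
    let ca := ca.insert x (ca.getD x 0 + 1)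
    (a, ca, res)
  else if PySem.List.pyGetD q 0 0 == 1 then
    let x := PySem.List.pyGetD q 1 0
    (a, ca, res ++ [(b.map (fun bj => ca.getD (x - bj) 0)).sum])
  else (a, ca, res)

def solution_alt (a : List Int) (b : List Int) (queries : List (List Int)) : List Int :=
  (queries.foldl (pvStepB b) (a, pvCountA a, [])).2.2

-- ===== PRECONDITION & SPEC =====
-- Pre_ excludes exactly the inputs on which the Python raises: an empty query (IndexError on
-- query[0]), a type-0 query whose length is not 3 (unpacking error) or whose index is out of
-- range for a (IndexError), and a type-1 query of length 1 (IndexError on query[1]).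
def Pre_solution (a : List Int) (b : List Int) (queries : List (List Int)) : Prop :=
  ∀ q ∈ queries, q ≠ [] ∧
    (PySem.List.pyGetD q 0 0 = 0 → q.length = 3 ∧ PySem.Raise.InRange a.length (PySem.List.pyGetD q 1 0)) ∧
    (PySem.List.pyGetD q 0 0 = 1 → 2 ≤ q.length)
instance (a : List Int) (b : List Int) (queries : List (List Int)) : Decidable (Pre_solution a b queries) := by unfold Pre_solution; infer_instance

def pvWitness_solution : List Int × List Int × List (List Int) :=
  ([1, 2], [3], [[1, 4], [0, 0, 5], [1, 8], [2, 9]])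

def Spec_solution (a : List Int) (b : List Int) (queries : List (List Int)) (out : List Int) : Prop := out = solution_alt a b queries
instance (a : List Int) (b : List Int) (queries : List (List Int)) (out : List Int) : Decidable (Spec_solution a b queries out) := by unfold Spec_solution; infer_instance

-- ===== CLAIM (what is proved, stated in full; the proofs are below) =====
def Claim_equal_solution : Prop := ∀ (a : List Int) (b : List Int) (queries : List (List Int)), Dom_solution a b queries → Pre_solution a b queries → Spec_solution a b queries (solution a b queries)

-- ===== LEMMAS AND PROOFS =====

def pvCntB (b : List Int) (v t : Int) : Int := (b.countP (fun bj => v + bj == t) : Int)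
def pvSumCnt (b : List Int) (av : List Int) (t : Int) : Int := (av.map (fun ai => pvCntB b ai t)).sum

theorem pvIncr_getD (pc : PySem.Dict Int Int) (s t : Int) :
    ((if pc.contains s then pc else pc.insert s 0).modify s 0 (· + 1)).getD t 0
      = pc.getD t 0 + (if t = s then 1 else 0) := by
  by_cases hc : pc.contains s
  · rw [if_pos hc, PySem.Dict.getD_modify]
    split_ifs with h <;> simp [h]
  · rw [if_neg (by simp [hc]), PySem.Dict.getD_modify]
    split_ifs with h
    · subst h
      rw [PySem.Dict.getD_insert_self, PySem.Dict.getD_of_not_contains pc 0 (by simp [hc])]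
    · rw [PySem.Dict.getD_insert, if_neg h, add_zero]

theorem pvDecrG_getD (pc : PySem.Dict Int Int) (s t : Int) (hpos : 0 < pc.getD s 0) :
    (if pc.contains s then pc.modify s 0 (· - 1) else pc).getD t 0
      = pc.getD t 0 - (if t = s then 1 else 0) := by
  have hc : pc.contains s = true := by
    cases h : pc.contains s
    · rw [PySem.Dict.getD_of_not_contains pc 0 h] at hpos; omega
    · rfl
  rw [if_pos (by simp [hc]), PySem.Dict.getD_modify]
  split_ifs with h <;> simp [h]

theorem pvFoldIncr (ai : Int) (bs : List Int) : ∀ (pc : PySem.Dict Int Int) (t : Int),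
    (bs.foldl (fun pc bj =>
        let s := ai + bj
        let pc := if pc.contains s then pc else pc.insert s 0
        pc.modify s 0 (· + 1)) pc).getD t 0 = pc.getD t 0 + pvCntB bs ai t := by
  induction bs with
  | nil => intro pc t; simp [pvCntB]
  | cons bj rest ih =>
    intro pc t
    simp only [List.foldl_cons]
    rw [ih, pvIncr_getD]
    simp only [pvCntB, List.countP_cons]
    push_cast
    by_cases h : ai + bj = t <;> simp [h] <;> omega

theorem pvFoldOuter (b : List Int) (as : List Int) : ∀ (pc : PySem.Dict Int Int) (t : Int),
    (as.foldl (fun pc ai =>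
        b.foldl (fun pc bj =>
          let s := ai + bj
          let pc := if pc.contains s then pc else pc.insert s 0
          pc.modify s 0 (· + 1)) pc) pc).getD t 0 = pc.getD t 0 + pvSumCnt b as t := by
  induction as with
  | nil => intro pc t; simp [pvSumCnt]
  | cons ai rest ih =>
    intro pc t
    simp only [List.foldl_cons]
    rw [ih, pvFoldIncr]
    simp [pvSumCnt]
    ring



theorem pvBuild_getD (a b : List Int) (t : Int) :
    (pvBuildPairs a b).getD t 0 = pvSumCnt b a t := by
  unfold pvBuildPairs
  have h1 : ∀ (pc : PySem.Dict Int Int) (i : Int),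
      ((PySem.List.pyRange 0 b.length 1).foldl (fun pc j =>
        let s := PySem.List.pyGetD a i 0 + PySem.List.pyGetD b j 0
        let pc := if pc.contains s then pc else pc.insert s 0
        pc.modify s 0 (· + 1)) pc)
      = b.foldl (fun pc bj =>
          let s := PySem.List.pyGetD a i 0 + bj
          let pc := if pc.contains s then pc else pc.insert s 0
          pc.modify s 0 (· + 1)) pc := by
    intro pc i
    exact PySem.List.foldl_pyRange_zero_pyGetD' b 0
      (fun pc bj =>
        let s := PySem.List.pyGetD a i 0 + bj
        let pc := if pc.contains s then pc else pc.insert s 0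
        pc.modify s 0 (· + 1)) pc
  simp only [h1]
  have houter := PySem.List.foldl_pyRange_zero_pyGetD' a 0
      (fun pc ai =>
        b.foldl (fun pc bj =>
          (if pc.contains (ai + bj) then pc else pc.insert (ai + bj) (0:Int)).modify (ai + bj) 0 (· + 1)) pc)
      (PySem.Dict.empty : PySem.Dict Int Int)
  have h2 := pvFoldOuter b a PySem.Dict.empty t
  have h3 : (PySem.Dict.empty : PySem.Dict Int Int).getD t 0 = 0 := rfl
  exact (congrArg (fun d => PySem.Dict.getD d t 0) houter).trans (h2.trans (by rw [h3, zero_add]))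

theorem pvSumCnt_eq (b : List Int) : ∀ (as : List Int) (t : Int),
    pvSumCnt b as t = (b.map (fun bj => ((as.count (t - bj) : Int)))).sum := by
  intro as
  induction as with
  | nil => intro t; simp [pvSumCnt]
  | cons ai rest ih =>
    intro t
    simp only [pvSumCnt, List.map_cons, List.sum_cons, List.count_cons]
    push_cast
    rw [PySem.List.sum_map_add_int]
    have hcnt : (List.map (fun bj => if (ai == t - bj) = true then (1:Int) else 0) b).sum
        = (b.countP (fun bj => ai == t - bj) : Int) := PySem.List.sum_map_ite_one_zero _ b
    have hcp : b.countP (fun bj => ai == t - bj) = b.countP (fun bj => ai + bj == t) := by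
      apply List.countP_congr; intro bj _; simp only [beq_iff_eq]; constructor <;> intro h <;> omega
    have := ih t
    simp only [pvSumCnt] at this
    rw [hcnt, hcp, this, pvCntB]
    ring

theorem pvSumCnt_append (b : List Int) (xs ys : List Int) (t : Int) :
    pvSumCnt b (xs ++ ys) t = pvSumCnt b xs t + pvSumCnt b ys t := by
  simp [pvSumCnt]

theorem pvSumCnt_cons (b : List Int) (x : Int) (xs : List Int) (t : Int) :
    pvSumCnt b (x :: xs) t = pvCntB b x t + pvSumCnt b xs t := by
  simp [pvSumCnt]

theorem pvSumCnt_set (b av : List Int) (n : Nat) (h : n < av.length) (x t : Int) :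
    pvSumCnt b (av.set n x) t = pvSumCnt b av t - pvCntB b (av.getD n 0) t + pvCntB b x t := by
  have hset : av.set n x = av.take n ++ x :: av.drop (n + 1) := by
    rw [List.set_eq_take_append_cons_drop, if_pos h]
  have hav : av = av.take n ++ av[n] :: av.drop (n + 1) := by
    conv_lhs => rw [← List.take_append_drop n av]
    rw [List.getElem_cons_drop h]
  have hgd : av.getD n 0 = av[n] := List.getD_eq_getElem av 0 h
  have key : pvSumCnt b av t
      = pvSumCnt b (av.take n) t + pvCntB b av[n] t + pvSumCnt b (av.drop (n + 1)) t := by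
    conv_lhs => rw [hav]
    rw [pvSumCnt_append, pvSumCnt_cons]; ring
  rw [hset, hgd, key, pvSumCnt_append, pvSumCnt_cons]; ring

theorem pvCount_set_int (av : List Int) (n : Nat) (h : n < av.length) (x v : Int) :
    (((av.set n x).count v : Int)) = (av.count v : Int)
      - (if av.getD n 0 = v then 1 else 0) + (if x = v then 1 else 0) := by
  have hgd : av.getD n 0 = av[n] := List.getD_eq_getElem av 0 h
  have hpos : av[n] = v → 1 ≤ av.count v := by
    intro hv
    exact List.count_pos_iff.mpr (hv ▸ List.getElem_mem h)
  rw [hgd, List.count_set h]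
  simp only [beq_iff_eq]
  by_cases h1 : av[n] = v <;> by_cases h2 : x = v <;>
    simp only [h1, h2, if_pos, if_neg, not_false_iff] <;>
    first
      | (have := hpos h1; omega)
      | omega

theorem pvCntB_le_sumCnt (b : List Int) (av : List Int) (old t : Int) (hmem : old ∈ av) :
    pvCntB b old t ≤ pvSumCnt b av t := by
  apply List.single_le_sum
  · intro y hy
    obtain ⟨ai, _, rfl⟩ := List.mem_map.mp hy
    simp [pvCntB]
  · exact List.mem_map_of_mem hmem

theorem pvFoldUpd (old x : Int) (bs : List Int) : ∀ (pc : PySem.Dict Int Int) (C : Int → Int),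
    (∀ t, pc.getD t 0 = C t) →
    (∀ t, ((bs.countP (fun bj => old + bj == t)) : Int) ≤ C t) →
    ∀ t, ((bs.foldl (fun pc bj =>
          let oldS := old + bj
          let pc := if pc.contains oldS then pc.modify oldS 0 (· - 1) else pc
          let newS := x + bj
          let pc := if pc.contains newS then pc else pc.insert newS 0
          pc.modify newS 0 (· + 1)) pc).getD t 0)
        = C t - (bs.countP (fun bj => old + bj == t) : Int)
            + (bs.countP (fun bj => x + bj == t) : Int) := by
  induction bs with
  | nil => intro pc C hC _ t; simp [hC]
  | cons bj rest ih =>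
    intro pc C hC hB t
    have hpos : 0 < pc.getD (old + bj) 0 := by
      rw [hC]
      have := hB (old + bj)
      rw [List.countP_cons] at this
      simp only [beq_self_eq_true] at this
      have h0 : (0:Int) ≤ (rest.countP (fun b' => old + b' == old + bj) : Int) := by positivity
      simp at this
      omega
    simp only [List.foldl_cons]
    rw [ih _ (fun t => C t - (if t = old + bj then 1 else 0) + (if t = x + bj then 1 else 0))]
    · simp only [List.countP_cons]
      by_cases h1 : old + bj = t <;> by_cases h2 : x + bj = t <;>
        simp only [h1, h2, beq_self_eq_true, if_pos, if_neg, beq_iff_eq, not_false_iff] <;>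
        push_cast <;> omega
    · intro t'
      rw [pvIncr_getD, pvDecrG_getD _ _ _ hpos, hC]
    · intro t'
      have := hB t'
      rw [List.countP_cons] at this
      by_cases h1 : old + bj = t' <;> by_cases h2 : x + bj = t' <;>
        simp only [h1, h2, beq_iff_eq, if_pos, if_neg, not_false_iff] at this ⊢ <;>
        push_cast at this ⊢ <;> omega

theorem pvIdx_norm (xs : List Int) (i : Int) (h : PySem.Raise.InRange xs.length i) :
    ∃ n : Nat, n < xs.length ∧ (∀ d, PySem.List.pyGetD xs i d = xs.getD n d) ∧
      (∀ v, PySem.List.pySetD xs i v = xs.set n v) := by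
  obtain ⟨h1, h2⟩ := h
  by_cases hi : 0 ≤ i
  · refine ⟨i.toNat, by omega, ?_, ?_⟩
    · intro d
      rw [PySem.List.pyGetD_of_nonneg xs d hi]
    · intro v
      rw [PySem.List.pySetD_of_nonneg xs v hi]
  · have hidx : PySem.List.pyIdx? xs.length i = some (xs.length - (-i).toNat) := by
      simp only [PySem.List.pyIdx?, if_neg hi, if_pos h1]
    refine ⟨xs.length - (-i).toNat, by omega, ?_, ?_⟩
    · intro d
      simp only [PySem.List.pyGetD, PySem.List.pyGet?, hidx, Option.bind_some]
      rw [List.getElem?_eq_getElem (by omega), List.getD_eq_getElem xs d (by omega)]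
      rfl
    · intro v
      simp only [PySem.List.pySetD, PySem.List.pySet?, hidx, Option.map_some, Option.getD_some]


theorem pvLoop (b : List Int) (queries : List (List Int)) :
    ∀ (qs : List (List Int)) (av : List Int) (pc ca : PySem.Dict Int Int) (aft : Int) (res : List Int),
    (∀ q ∈ qs, PySem.List.pyGetD q 0 0 = 0 → PySem.Raise.InRange av.length (PySem.List.pyGetD q 1 0)) →
    (∀ t, pc.getD t 0 = pvSumCnt b av t) →
    (∀ v, ca.getD v 0 = (av.count v : Int)) →
    (qs.foldl (pvStepA b queries) (av, pc, aft, res)).2.2.2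
      = (qs.foldl (pvStepB b) (av, ca, res)).2.2 := by
  intro qs
  induction qs with
  | nil => intro av pc ca aft res _ _ _; rfl
  | cons q rest ih =>
    intro av pc ca aft res H hpc hca
    simp only [List.foldl_cons]
    by_cases hq0 : PySem.List.pyGetD q 0 0 = 0
    · -- type-0 update
      have hir := H q (List.mem_cons_self) hq0
      obtain ⟨n, hn, hget, hset⟩ := pvIdx_norm av (PySem.List.pyGetD q 1 0) hir
      set i := PySem.List.pyGetD q 1 0 with hi
      set x := PySem.List.pyGetD q 2 0 with hx
      set old := PySem.List.pyGetD av i 0 with hold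
      have holdn : old = av.getD n 0 := hget 0
      have hmem : old ∈ av := by
        rw [holdn, List.getD_eq_getElem av 0 hn]
        exact List.getElem_mem hn
      have hstepA : pvStepA b queries (av, pc, aft, res) q
          = (av.set n x,
             b.foldl (fun pc bj =>
               let oldS := old + bj
               let pc := if pc.contains oldS then pc.modify oldS 0 (· - 1) else pc
               let newS := x + bj
               let pc := if pc.contains newS then pc else pc.insert newS 0
               pc.modify newS 0 (· + 1)) pc,
             pvSumType1 (b.foldl (fun pc bj =>
               let oldS := old + bj
               let pc := if pc.contains oldS then pc.modify oldS 0 (· - 1) else pc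
               let newS := x + bj
               let pc := if pc.contains newS then pc else pc.insert newS 0
               pc.modify newS 0 (· + 1)) pc) queries,
             res) := by
        have hfold : ((PySem.List.pyRange 0 b.length 1).foldl (fun pc j =>
               let oldS := old + PySem.List.pyGetD b j 0
               let pc := if pc.contains oldS then pc.modify oldS 0 (· - 1) else pc
               let newS := x + PySem.List.pyGetD b j 0
               let pc := if pc.contains newS then pc else pc.insert newS 0
               pc.modify newS 0 (· + 1)) pc)
            = b.foldl (fun pc bj =>
               let oldS := old + bj
               let pc := if pc.contains oldS then pc.modify oldS 0 (· - 1) else pc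
               let newS := x + bj
               let pc := if pc.contains newS then pc else pc.insert newS 0
               pc.modify newS 0 (· + 1)) pc :=
          PySem.List.foldl_pyRange_zero_pyGetD' b 0
            (fun pc bj =>
               let oldS := old + bj
               let pc := if pc.contains oldS then pc.modify oldS 0 (· - 1) else pc
               let newS := x + bj
               let pc := if pc.contains newS then pc else pc.insert newS 0
               pc.modify newS 0 (· + 1)) pc
        simp only [pvStepA, hq0, beq_self_eq_true, if_pos]
        rw [← hi, ← hx, ← hold, hset x, hfold]
      have hstepB : pvStepB b (av, ca, res) q
          = (av.set n x,
             (ca.insert old (ca.getD old 0 - 1)).insert x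
               ((ca.insert old (ca.getD old 0 - 1)).getD x 0 + 1),
             res) := by
        simp only [pvStepB, hq0, beq_self_eq_true, if_pos]
        rw [← hi, ← hx, ← hold, hset x]
      rw [hstepA, hstepB]
      have hbound : ∀ t, ((b.countP (fun bj => old + bj == t)) : Int) ≤ pvSumCnt b av t :=
        fun t => pvCntB_le_sumCnt b av old t hmem
      have hpc' : ∀ t, (b.foldl (fun pc bj =>
            let oldS := old + bj
            let pc := if pc.contains oldS then pc.modify oldS 0 (· - 1) else pc
            let newS := x + bj
            let pc := if pc.contains newS then pc else pc.insert newS 0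
            pc.modify newS 0 (· + 1)) pc).getD t 0 = pvSumCnt b (av.set n x) t := by
        intro t
        rw [pvFoldUpd old x b pc (pvSumCnt b av) hpc hbound t,
          pvSumCnt_set b av n hn x t, ← holdn]
        rfl
      have hca' : ∀ v, ((ca.insert old (ca.getD old 0 - 1)).insert x
            ((ca.insert old (ca.getD old 0 - 1)).getD x 0 + 1)).getD v 0
          = ((av.set n x).count v : Int) := by
        intro v
        have hrhs := pvCount_set_int av n hn x v
        rw [← holdn] at hrhs
        rw [hrhs]
        simp only [PySem.Dict.getD_insert]
        by_cases hvx : v = x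
        · rw [hvx.symm]
          by_cases hvold : v = old
          · rw [hvold.symm]
            simp only [ite_true, hca]
          · have h1 : ¬ old = v := fun h => hvold h.symm
            simp only [ite_true, if_neg hvold, if_neg h1, hca]
            omega
        · have h2 : ¬ x = v := fun h => hvx h.symm
          by_cases hvold : v = old
          · rw [hvold.symm]
            simp only [if_neg hvx, ite_true, if_neg h2, hca]
            omega
          · have h3 : ¬ old = v := fun h => hvold h.symm
            simp only [if_neg hvx, if_neg hvold, if_neg h3, if_neg h2, hca]
            omega
      have H' : ∀ q' ∈ rest, PySem.List.pyGetD q' 0 0 = 0 →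
          PySem.Raise.InRange (av.set n x).length (PySem.List.pyGetD q' 1 0) := by
        intro q' hq' h0'
        have := H q' (List.mem_cons_of_mem _ hq') h0'
        simpa [List.length_set] using this
      exact ih (av.set n x) _ _ _ res H' hpc' hca'
    · by_cases hq1 : PySem.List.pyGetD q 0 0 = 1
      · have hstepA : pvStepA b queries (av, pc, aft, res) q
            = (av, pc, aft, res ++ [pc.getD (PySem.List.pyGetD q 1 0) 0]) := by
          simp only [pvStepA]
          simp [hq1]
        have hstepB : pvStepB b (av, ca, res) q
            = (av, ca, res ++ [(b.map (fun bj => ca.getD (PySem.List.pyGetD q 1 0 - bj) 0)).sum]) := by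
          simp only [pvStepB]
          simp [hq1]
        have hval : pc.getD (PySem.List.pyGetD q 1 0) 0
            = (b.map (fun bj => ca.getD (PySem.List.pyGetD q 1 0 - bj) 0)).sum := by
          rw [hpc, pvSumCnt_eq]
          congr 1
          apply List.map_congr_left
          intro bj _
          rw [hca]
        rw [hstepA, hstepB, hval]
        exact ih av pc ca aft _ (fun q' hq' h0' => H q' (List.mem_cons_of_mem _ hq') h0') hpc hca
      · have hstepA : pvStepA b queries (av, pc, aft, res) q = (av, pc, aft, res) := by
          simp only [pvStepA]
          simp [hq0, hq1]
        have hstepB : pvStepB b (av, ca, res) q = (av, ca, res) := by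
          simp only [pvStepB]
          simp [hq0, hq1]
        rw [hstepA, hstepB]
        exact ih av pc ca aft res (fun q' hq' h0' => H q' (List.mem_cons_of_mem _ hq') h0') hpc hca

theorem pvFinal (a b : List Int) (queries : List (List Int)) (hpre : Pre_solution a b queries) :
    solution a b queries = solution_alt a b queries := by
  unfold solution solution_alt
  apply pvLoop
  · intro q hq h0
    exact ((hpre q hq).2.1 h0).2
  · intro t
    exact pvBuild_getD a b t
  · intro v
    have h := PySem.Dict.getD_foldl_insert_add_one a (PySem.Dict.empty : PySem.Dict Int Int) v
    have h0 : (PySem.Dict.empty : PySem.Dict Int Int).getD v 0 = 0 := rfl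
    unfold pvCountA
    rw [h, h0, zero_add]

-- ===== VERDICT (by name: the statement is the Claim_ definition above) =====
theorem solution_spec : Claim_equal_solution := by
  intro a b queries _ hpre
  unfold Spec_solution
  exact pvFinal a b queries hpre
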